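-- pv_equiv track=rewrite | github.com/cafrii/omega2 | 백준/Gold/27172. 수 나누기 게임/27172.py | solve_fast2
-- ===== SOURCE A (Python) =====
-- def solve_fast2(A:list[int])->list[int]:
--     '''
--     implement without mod(%) operation
--     sort() is not used also
--     '''
--     N = len(A)
--     mx = max(A)
--     bf = [0] * (mx+1)  # boolean flag whether the index is in A
--     for a in A:
--         bf[a] = 1
--
--     scores = [0] * (mx+1)
--     for a in A:
--         if a+a > mx:
--             continue
--         for b in range(a+a,mx+1,a):
--             if bf[b]: # only if b is in A
--                 scores[b] -= 1
--                 scores[a] += 1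
--
--     # return re-arranged scores
--     return [ scores[a] for a in A ]
-- ===== SOURCE B (Python) =====
-- def solve_fast2(A: list[int]) -> list[int]:
--     # Direct divisibility tests over the distinct values instead of a sieve array.
--     # The game is played on positive card values; validate the input up front.
--     if min(A) < 1:
--         raise ValueError("card values must be positive")
--     values = set(A)
--     score = {a: 0 for a in A}
--     for a in A:
--         for v in values:
--             if v > a and v % a == 0:
--                 score[a] += 1
--                 score[v] -= 1
--     return [score[a] for a in A]
-- ===== Notes on version B (the rewrite author's own statement) =====
-- stated objective: alternative
-- what changed: A marks a shared sieve array along arithmetic progressions of multiples (bf/scores lists indexed up to max(A)); B tests divisibility directly with % over the distinct values and accumulates scores in a dict, with no arrays sized by max(A), after validating that all card values are positive. Pre_ restricts to nonempty lists of positive integers: on [] and on lists containing 0 or a negative value both programs raise, except that on some negative-element lists A happens to return a value that is an artefact of Python's negative-index wraparound in its sieve arrays.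
-- outside the precondition, e.g. on solve_fast2([-2, 1, 2]): A returns [1, 1, -1], B raises ValueError; on solve_fast2([-1, 2]): A returns [0, 0], B raises ValueError; on solve_fast2([]): A raises ValueError, B raises ValueError
import Mathlib
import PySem

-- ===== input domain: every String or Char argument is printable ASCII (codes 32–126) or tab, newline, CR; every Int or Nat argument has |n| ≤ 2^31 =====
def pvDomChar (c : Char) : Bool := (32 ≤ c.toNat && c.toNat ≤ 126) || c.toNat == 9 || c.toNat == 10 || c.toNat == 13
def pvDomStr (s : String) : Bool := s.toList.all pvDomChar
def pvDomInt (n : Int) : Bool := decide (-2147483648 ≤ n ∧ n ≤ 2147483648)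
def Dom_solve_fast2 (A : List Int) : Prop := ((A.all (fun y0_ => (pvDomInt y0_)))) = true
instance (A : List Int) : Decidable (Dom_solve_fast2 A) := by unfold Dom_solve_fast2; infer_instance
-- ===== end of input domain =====

-- B replaces A's shared sieve array (marked along arithmetic progressions of multiples) by direct
-- divisibility tests over the distinct values, accumulating scores in a dict (objective: alternative).

-- ===== PORT A =====
-- Python list indexing on an int array: negative indices read from the end, as Python does;
-- an out-of-range access (where Python raises IndexError) reads 0 / writes nothing.
def pyAIdx (n : Nat) (i : Int) : Nat := if i < 0 then ((n : Int) + i).toNat else i.toNat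
def pyAGet (xs : Array Int) (i : Int) : Int := xs.getD (pyAIdx xs.size i) 0
def pyASet (xs : Array Int) (i v : Int) : Array Int := xs.setIfInBounds (pyAIdx xs.size i) v

def solve_fast2 (A : List Int) : List Int :=
  match PySem.List.max? A (fun x => x) with
  | none => []
  | some mx =>
    let bf : Array Int := A.foldl (fun f a => pyASet f a 1) (Array.replicate (mx + 1).toNat 0)
    let scores : Array Int := A.foldl (fun s a =>
      if a + a > mx then s
      else (PySem.List.pyRange (a + a) (mx + 1) a).foldl (fun s b =>
        if pyAGet bf b = 1 then
          let s1 : Array Int := pyASet s b (pyAGet s b - 1)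
          pyASet s1 a (pyAGet s1 a + 1)
        else s) s) (Array.replicate (mx + 1).toNat 0)
    A.map (fun a => pyAGet scores a)

-- ===== PORT B =====
def solve_fast2_alt (A : List Int) : List Int :=
  if A.isEmpty || A.any (fun a => a < 1) then []  -- Python B raises ValueError here; outside Pre_
  else
  let values : PySem.Set Int := PySem.Set.ofList A
  let score0 : PySem.Dict Int Int := A.foldl (fun d a => d.insert a 0) PySem.Dict.empty
  let score : PySem.Dict Int Int := A.foldl (fun d a =>
    values.foldl (fun d v =>
      if v > a ∧ PySem.Int.mod v a = 0 then
        let d1 : PySem.Dict Int Int := d.insert a (d.getD a 0 + 1)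
        d1.insert v (d1.getD v 0 - 1)
      else d) d) score0
  A.map (fun a => score.getD a 0)

-- ===== PRECONDITION & SPEC =====
-- Pre_ restricts to the problem's natural domain: a nonempty list of positive integers.
-- On [] and on lists containing 0 or a negative value both programs raise (A: ValueError/IndexError,
-- B: its ValueError validation), except that on some negative-element lists A happens to return a
-- value that is an artefact of Python's negative-index wraparound in its sieve arrays (see cites).
def Pre_solve_fast2 (A : List Int) : Prop := A ≠ [] ∧ ∀ a ∈ A, 1 ≤ a
instance (A : List Int) : Decidable (Pre_solve_fast2 A) := by unfold Pre_solve_fast2; infer_instance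
def pvWitness_solve_fast2 : List Int := [2, 2, 4, 3, 6, 1]

def Spec_solve_fast2 (A : List Int) (out : List Int) : Prop := out = solve_fast2_alt A
instance (A : List Int) (out : List Int) : Decidable (Spec_solve_fast2 A out) := by unfold Spec_solve_fast2; infer_instance

-- ===== CLAIM (what is proved, stated in full; the proofs are below) =====
def Claim_equal_solve_fast2 : Prop := ∀ (A : List Int), Dom_solve_fast2 A → Pre_solve_fast2 A → Spec_solve_fast2 A (solve_fast2 A)

-- ===== LEMMAS AND PROOFS =====

lemma size_pyASet (xs : Array Int) (i v : Int) : (pyASet xs i v).size = xs.size :=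
  Array.size_setIfInBounds

lemma pyAIdx_nonneg (n : Nat) {i : Int} (h : 0 ≤ i) : pyAIdx n i = i.toNat := by
  simp [pyAIdx, not_lt.mpr h]

lemma pyAGet_replicate (n : Nat) (i : Int) : pyAGet (Array.replicate n (0:Int)) i = 0 := by
  simp only [pyAGet, Array.getD_eq_getD_getElem?, Array.size_replicate, Array.getElem?_replicate]
  split <;> simp

lemma pyAGet_set_self (xs : Array Int) (i v : Int) (h0 : 0 ≤ i) (h : i < (xs.size : Int)) :
    pyAGet (pyASet xs i v) i = v := by
  simp only [pyAGet, pyASet, Array.size_setIfInBounds, pyAIdx_nonneg _ h0,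
    Array.getD_eq_getD_getElem?, Array.getElem?_setIfInBounds]
  have : i.toNat < xs.size := by omega
  simp [this]

lemma pyAGet_set_ne (xs : Array Int) (i j v : Int) (h0 : 0 ≤ i) (hj : 0 ≤ j) (hne : j ≠ i) :
    pyAGet (pyASet xs i v) j = pyAGet xs j := by
  simp only [pyAGet, pyASet, Array.size_setIfInBounds, pyAIdx_nonneg _ h0, pyAIdx_nonneg _ hj,
    Array.getD_eq_getD_getElem?, Array.getElem?_setIfInBounds]
  have : ¬ (i.toNat = j.toNat) := by omega
  simp [this]

lemma bf_fold_eq (A : List Int) (xs : Array Int) (x : Int) (hx : 0 ≤ x)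
    (hA : ∀ a ∈ A, 0 ≤ a ∧ a < (xs.size : Int)) :
    pyAGet (A.foldl (fun f a => pyASet f a 1) xs) x = if x ∈ A then 1 else pyAGet xs x := by
  induction A generalizing xs with
  | nil => simp
  | cons a A ih =>
    obtain ⟨ha0, halt⟩ := hA a (by simp)
    have hA' : ∀ b ∈ A, 0 ≤ b ∧ b < ((pyASet xs a 1).size : Int) := by
      intro b hb
      rw [size_pyASet]
      exact hA b (by simp [hb])
    rw [List.foldl_cons, ih _ hA']
    by_cases hxA : x ∈ A
    · simp [hxA]
    · by_cases hxa : x = a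
      · subst hxa
        simp [hxA, pyAGet_set_self xs x 1 hx halt]
      · simp [hxA, hxa, pyAGet_set_ne xs a x 1 ha0 hx hxa]

lemma inner_fold_size (bfA : Array Int) (a : Int) (L : List Int) (s : Array Int) :
    (L.foldl (fun s b => if pyAGet bfA b = 1 then
        let s1 : Array Int := pyASet s b (pyAGet s b - 1)
        pyASet s1 a (pyAGet s1 a + 1)
      else s) s).size = s.size := by
  induction L generalizing s with
  | nil => rfl
  | cons b L ih =>
    rw [List.foldl_cons]
    by_cases hb : pyAGet bfA b = 1
    · rw [if_pos hb, ih]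
      simp [size_pyASet]
    · rw [if_neg hb, ih]

lemma inner_fold_eq (bfA : Array Int) (a : Int) (L : List Int) (hna : a ∉ L) (hnd : L.Nodup)
    (ha0 : 0 ≤ a) (s : Array Int) (halt : a < (s.size : Int))
    (hL : ∀ b ∈ L, 0 ≤ b ∧ b < (s.size : Int)) (x : Int) (hx : 0 ≤ x) :
    pyAGet (L.foldl (fun s b => if pyAGet bfA b = 1 then
        let s1 : Array Int := pyASet s b (pyAGet s b - 1)
        pyASet s1 a (pyAGet s1 a + 1)
      else s) s) x
    = pyAGet s x + (if x = a then (L.countP (fun b => decide (pyAGet bfA b = 1)) : Int) else 0)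
          - (if x ∈ L ∧ pyAGet bfA x = 1 then 1 else 0) := by
  induction L generalizing s with
  | nil => simp
  | cons b L ih =>
    simp only [List.mem_cons, not_or] at hna
    obtain ⟨hab, haL⟩ := hna
    simp only [List.nodup_cons] at hnd
    obtain ⟨hbL, hndL⟩ := hnd
    obtain ⟨hb0, hblt⟩ := hL b (by simp)
    simp only [List.foldl_cons]
    by_cases hb : pyAGet bfA b = 1
    · rw [if_pos hb]
      set s1 : Array Int := pyASet s b (pyAGet s b - 1) with hs1
      set s2 : Array Int := pyASet s1 a (pyAGet s1 a + 1) with hs2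
      have hsz2 : s2.size = s.size := by rw [hs2, hs1, size_pyASet, size_pyASet]
      have hL' : ∀ t ∈ L, 0 ≤ t ∧ t < (s2.size : Int) := by
        intro t ht
        rw [hsz2]
        exact hL t (by simp [ht])
      have hval_a : pyAGet s2 a = pyAGet s a + 1 := by
        rw [hs2, pyAGet_set_self _ _ _ ha0 (by rw [hs1, size_pyASet]; exact halt), hs1,
          pyAGet_set_ne _ _ _ _ hb0 ha0 hab]
      have hval_b : pyAGet s2 b = pyAGet s b - 1 := by
        rw [hs2, pyAGet_set_ne _ _ _ _ ha0 hb0 (Ne.symm hab), hs1,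
          pyAGet_set_self _ _ _ hb0 hblt]
      have hval_o : ∀ y, 0 ≤ y → y ≠ a → y ≠ b → pyAGet s2 y = pyAGet s y := by
        intro y hy hya hyb
        rw [hs2, pyAGet_set_ne _ _ _ _ ha0 hy hya, hs1, pyAGet_set_ne _ _ _ _ hb0 hy hyb]
      rw [ih haL hndL s2 (by rw [hsz2]; exact halt) hL']
      simp only [List.countP_cons, List.mem_cons, hb, decide_true]
      by_cases hxa : x = a
      · subst hxa
        simp only [hval_a]
        simp [hab, haL]
        ring
      · by_cases hxb : x = b
        · subst hxb
          simp only [hval_b]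
          simp [hxa, hbL, hb]
        · rw [hval_o x hx hxa hxb]
          simp [hxa, hxb]
    · rw [if_neg hb]
      rw [ih haL hndL s halt (fun t ht => hL t (by simp [ht]))]
      simp only [List.countP_cons, List.mem_cons, hb, decide_false]
      by_cases hxb : x = b
      · subst hxb
        simp [hb]
      · simp [hxb]

lemma mem_R_iff {mx a : Int} (ha : 1 ≤ a) (x : Int) :
    x ∈ PySem.List.pyRange (a + a) (mx + 1) a ↔ a ∣ x ∧ a < x ∧ x ≤ mx := by
  rw [PySem.List.mem_pyRange_iff_of_pos (by omega)]
  have h2a : a ∣ a + a := ⟨2, by ring⟩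
  constructor
  · rintro ⟨h1, h2, h3⟩
    have hd : a ∣ x := by have := dvd_add h3 h2a; simpa using this
    exact ⟨hd, by omega, by omega⟩
  · rintro ⟨⟨k, hk⟩, h2, h3⟩
    have hk2 : 2 ≤ k := by nlinarith
    refine ⟨by nlinarith, by omega, ?_⟩
    exact dvd_sub ⟨k, hk⟩ h2a

lemma nodup_R {mx a : Int} (ha : 1 ≤ a) :
    (PySem.List.pyRange (a + a) (mx + 1) a).Nodup := by
  rw [PySem.List.pyRange_of_pos _ _ (by omega)]
  refine (List.nodup_range).map ?_
  intro k1 k2 h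
  have h2 : a * (k1:Int) = a * (k2:Int) := by linarith
  have := mul_left_cancel₀ (show a ≠ 0 by omega) h2
  exact_mod_cast this

lemma not_mem_R {mx a : Int} (ha : 1 ≤ a) :
    a ∉ PySem.List.pyRange (a + a) (mx + 1) a := by
  rw [mem_R_iff ha]; omega

lemma R_eq_nil {mx a : Int} (ha : 1 ≤ a) (h : a + a > mx) :
    PySem.List.pyRange (a + a) (mx + 1) a = [] := by
  rw [PySem.List.pyRange_of_pos _ _ (by omega : (0:Int) < a)]
  simp [show ¬(a + a < mx + 1) by omega]

-- net effect of one outer iteration of A's sieve on cell x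
def incA (A : List Int) (mx a x : Int) : Int :=
  (if x = a then ((PySem.List.pyRange (a + a) (mx + 1) a).countP (fun b => decide (b ∈ A)) : Int) else 0)
  - (if x ∈ PySem.List.pyRange (a + a) (mx + 1) a ∧ x ∈ A then 1 else 0)

lemma outer_fold_eq (A : List Int) (mx : Int) (bfA : Array Int)
    (hbf : ∀ y, 0 ≤ y → pyAGet bfA y = if y ∈ A then 1 else 0)
    (ℓ : List Int) (hpos : ∀ a ∈ ℓ, 1 ≤ a) (hub : ∀ a ∈ ℓ, a ≤ mx)
    (s : Array Int) (hsz : (s.size : Int) = mx + 1) (x : Int) (hx : 0 ≤ x) :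
    pyAGet (ℓ.foldl (fun s a =>
      if a + a > mx then s
      else (PySem.List.pyRange (a + a) (mx + 1) a).foldl (fun s b =>
        if pyAGet bfA b = 1 then
          let s1 : Array Int := pyASet s b (pyAGet s b - 1)
          pyASet s1 a (pyAGet s1 a + 1)
        else s) s) s) x
    = pyAGet s x + ((ℓ.map (fun a => incA A mx a x)).sum) := by
  induction ℓ generalizing s with
  | nil => simp
  | cons a ℓ ih =>
    have ha : 1 ≤ a := hpos a (by simp)
    have hamx : a ≤ mx := hub a (by simp)
    simp only [List.foldl_cons]
    have hsz' : (((if a + a > mx then s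
        else (PySem.List.pyRange (a + a) (mx + 1) a).foldl (fun s b =>
          if pyAGet bfA b = 1 then
            let s1 : Array Int := pyASet s b (pyAGet s b - 1)
            pyASet s1 a (pyAGet s1 a + 1)
          else s) s).size : Nat) : Int) = mx + 1 := by
      by_cases hgt : a + a > mx
      · rw [if_pos hgt]; exact hsz
      · rw [if_neg hgt, inner_fold_size]; exact hsz
    rw [ih (fun t ht => hpos t (by simp [ht])) (fun t ht => hub t (by simp [ht])) _ hsz']
    simp only [List.map_cons, List.sum_cons]
    have hstep : pyAGet (if a + a > mx then s
        else (PySem.List.pyRange (a + a) (mx + 1) a).foldl (fun s b =>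
          if pyAGet bfA b = 1 then
            let s1 : Array Int := pyASet s b (pyAGet s b - 1)
            pyASet s1 a (pyAGet s1 a + 1)
          else s) s) x = pyAGet s x + incA A mx a x := by
      by_cases hgt : a + a > mx
      · rw [if_pos hgt]
        simp [incA, R_eq_nil ha hgt]
      · rw [if_neg hgt]
        rw [inner_fold_eq bfA a _ (not_mem_R ha) (nodup_R ha) (by omega) s (by omega)
          (fun b hb => by
            rw [mem_R_iff ha] at hb
            obtain ⟨-, h1, h2⟩ := hb
            exact ⟨by omega, by omega⟩) x hx]
        have hc : (PySem.List.pyRange (a + a) (mx + 1) a).countP (fun b => decide (pyAGet bfA b = 1))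
            = (PySem.List.pyRange (a + a) (mx + 1) a).countP (fun b => decide (b ∈ A)) := by
          apply List.countP_congr
          intro b hbm
          have hb0 : 0 ≤ b := by
            rw [mem_R_iff ha] at hbm
            omega
          rw [hbf b hb0]
          by_cases hbA : b ∈ A <;> simp [hbA]
        rw [hc]
        simp only [incA, hbf x hx]
        by_cases hxA : x ∈ A
        · simp [hxA]
          ring
        · simp [hxA]
    rw [hstep]; ring

-- net effect of one outer iteration of B's dict loop on key x
def incB (values : List Int) (a x : Int) : Int :=
  (if x = a then (values.countP (fun v => decide (v > a ∧ PySem.Int.mod v a = 0)) : Int) else 0)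
  - (if x ∈ values ∧ x > a ∧ PySem.Int.mod x a = 0 then 1 else 0)

lemma dict_inner_fold_eq (a : Int) (l : List Int) (hnd : l.Nodup)
    (d : PySem.Dict Int Int) (x : Int) :
    ((l.foldl (fun d v =>
      if v > a ∧ PySem.Int.mod v a = 0 then
        let d1 : PySem.Dict Int Int := d.insert a (d.getD a 0 + 1)
        d1.insert v (d1.getD v 0 - 1)
      else d) d).getD x 0)
    = d.getD x 0 + (if x = a then (l.countP (fun v => decide (v > a ∧ PySem.Int.mod v a = 0)) : Int) else 0)
        - (if x ∈ l ∧ x > a ∧ PySem.Int.mod x a = 0 then 1 else 0) := by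
  induction l generalizing d with
  | nil => simp
  | cons v l ih =>
    simp only [List.nodup_cons] at hnd
    obtain ⟨hvl, hndl⟩ := hnd
    simp only [List.foldl_cons]
    by_cases hc : v > a ∧ PySem.Int.mod v a = 0
    · rw [if_pos hc]
      have hva : v ≠ a := by intro h; rw [h] at hc; exact lt_irrefl a hc.1
      set d1 : PySem.Dict Int Int := d.insert a (d.getD a 0 + 1) with hd1
      set d2 : PySem.Dict Int Int := d1.insert v (d1.getD v 0 - 1) with hd2
      have hval_a : d2.getD a 0 = d.getD a 0 + 1 := by
        rw [hd2, PySem.Dict.getD_insert, if_neg (Ne.symm hva), hd1, PySem.Dict.getD_insert_self]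
      have hval_v : d2.getD v 0 = d.getD v 0 - 1 := by
        rw [hd2, PySem.Dict.getD_insert_self, hd1, PySem.Dict.getD_insert, if_neg hva]
      have hval_o : ∀ y, y ≠ a → y ≠ v → d2.getD y 0 = d.getD y 0 := by
        intro y hya hyv
        rw [hd2, PySem.Dict.getD_insert, if_neg hyv, hd1, PySem.Dict.getD_insert, if_neg hya]
      rw [ih hndl d2]
      rw [List.countP_cons_of_pos (by simp [hc])]
      by_cases hxa : x = a
      · have hQx : ¬ (x > a ∧ PySem.Int.mod x a = 0) := by
          rintro ⟨h, -⟩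
          rw [hxa] at h
          exact lt_irrefl a h
        have h1 : ¬ (x ∈ l ∧ x > a ∧ PySem.Int.mod x a = 0) := fun h => hQx h.2
        have h2 : ¬ (x ∈ v :: l ∧ x > a ∧ PySem.Int.mod x a = 0) := fun h => hQx h.2
        have hga : d2.getD x 0 = d.getD x 0 + 1 := by rw [hxa]; exact hval_a
        rw [if_pos hxa, if_pos hxa, if_neg h1, if_neg h2, hga]
        push_cast
        ring
      · by_cases hxv : x = v
        · have hgv : d2.getD x 0 = d.getD x 0 - 1 := by rw [hxv]; exact hval_v
          have h1 : ¬ (x ∈ l ∧ x > a ∧ PySem.Int.mod x a = 0) := by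
            rintro ⟨hm, -⟩
            rw [hxv] at hm
            exact hvl hm
          have h2 : x ∈ v :: l ∧ x > a ∧ PySem.Int.mod x a = 0 := by
            refine ⟨by rw [hxv]; exact List.mem_cons_self, ?_⟩
            rw [hxv]
            exact hc
          rw [if_neg hxa, if_neg hxa, if_neg h1, if_pos h2, hgv]
          ring
        · rw [hval_o x hxa hxv, if_neg hxa, if_neg hxa]
          have hmem : (x ∈ v :: l ∧ x > a ∧ PySem.Int.mod x a = 0)
              ↔ (x ∈ l ∧ x > a ∧ PySem.Int.mod x a = 0) := by
            constructor
            · rintro ⟨hm, hq⟩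
              rcases List.mem_cons.mp hm with h | h
              · exact absurd h hxv
              · exact ⟨h, hq⟩
            · rintro ⟨hm, hq⟩
              exact ⟨List.mem_cons_of_mem _ hm, hq⟩
          by_cases hxl : x ∈ l ∧ x > a ∧ PySem.Int.mod x a = 0
          · rw [if_pos hxl, if_pos (hmem.mpr hxl)]
          · rw [if_neg hxl, if_neg (fun h => hxl (hmem.mp h))]
    · rw [if_neg hc, ih hndl d]
      rw [List.countP_cons_of_neg (by simp [hc])]
      have hmem : (x ∈ v :: l ∧ x > a ∧ PySem.Int.mod x a = 0)
          ↔ (x ∈ l ∧ x > a ∧ PySem.Int.mod x a = 0) := by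
        constructor
        · rintro ⟨hm, hq⟩
          rcases List.mem_cons.mp hm with h | h
          · rw [h] at hq
            exact absurd hq hc
          · exact ⟨h, hq⟩
        · rintro ⟨hm, hq⟩
          exact ⟨List.mem_cons_of_mem _ hm, hq⟩
      by_cases hxl : x ∈ l ∧ x > a ∧ PySem.Int.mod x a = 0
      · rw [if_pos hxl, if_pos (hmem.mpr hxl)]
      · rw [if_neg hxl, if_neg (fun h => hxl (hmem.mp h))]

lemma dict_outer_fold_eq (values : List Int) (hnd : values.Nodup)
    (ℓ : List Int) (d : PySem.Dict Int Int) (x : Int) :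
    ((ℓ.foldl (fun d a =>
      values.foldl (fun d v =>
        if v > a ∧ PySem.Int.mod v a = 0 then
          let d1 : PySem.Dict Int Int := d.insert a (d.getD a 0 + 1)
          d1.insert v (d1.getD v 0 - 1)
        else d) d) d).getD x 0)
    = d.getD x 0 + ((ℓ.map (fun a => incB values a x)).sum) := by
  induction ℓ generalizing d with
  | nil => simp
  | cons a ℓ ih =>
    simp only [List.foldl_cons, List.map_cons, List.sum_cons]
    rw [ih, dict_inner_fold_eq a values hnd d x]
    simp only [incB]
    ring

lemma score0_getD (A : List Int) (d : PySem.Dict Int Int)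
    (hd : ∀ y, d.getD y 0 = 0) (x : Int) :
    (A.foldl (fun d a => d.insert a 0) d).getD x 0 = 0 := by
  induction A generalizing d with
  | nil => exact hd x
  | cons a A ih =>
    rw [List.foldl_cons]
    apply ih
    intro y
    rw [PySem.Dict.getD_insert]
    split
    · rfl
    · exact hd y

lemma incA_eq_incB (A : List Int) (mx : Int) (hub : ∀ y ∈ A, y ≤ mx)
    (a : Int) (ha : 1 ≤ a) (x : Int) (hxA : x ∈ A) :
    incA A mx a x = incB (PySem.Set.ofList A) a x := by
  have hcnt : (PySem.List.pyRange (a + a) (mx + 1) a).countP (fun b => decide (b ∈ A))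
      = (PySem.Set.ofList A).countP (fun v => decide (v > a ∧ PySem.Int.mod v a = 0)) := by
    rw [List.countP_eq_length_filter, List.countP_eq_length_filter]
    apply List.Perm.length_eq
    rw [List.perm_ext_iff_of_nodup ((nodup_R ha).filter _) ((PySem.Set.nodup_ofList A).filter _)]
    intro v
    simp only [List.mem_filter, mem_R_iff ha, PySem.Set.mem_ofList, decide_eq_true_eq,
      PySem.Int.mod_eq_zero_iff_dvd]
    constructor
    · rintro ⟨⟨hdvd, hlt, -⟩, hvA⟩
      exact ⟨hvA, ⟨hlt, hdvd⟩⟩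
    · rintro ⟨hvA, hlt, hdvd⟩
      exact ⟨⟨hdvd, hlt, hub v hvA⟩, hvA⟩
  have hmem : (x ∈ PySem.List.pyRange (a + a) (mx + 1) a ∧ x ∈ A)
      ↔ (x ∈ (PySem.Set.ofList A : List Int) ∧ x > a ∧ PySem.Int.mod x a = 0) := by
    simp only [mem_R_iff ha, PySem.Set.mem_ofList, PySem.Int.mod_eq_zero_iff_dvd]
    constructor
    · rintro ⟨⟨hdvd, hlt, -⟩, -⟩
      exact ⟨hxA, hlt, hdvd⟩
    · rintro ⟨-, hlt, hdvd⟩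
      exact ⟨⟨hdvd, hlt, hub x hxA⟩, hxA⟩
  unfold incA incB
  rw [hcnt]
  congr 1
  by_cases h : x ∈ PySem.List.pyRange (a + a) (mx + 1) a ∧ x ∈ A
  · rw [if_pos h, if_pos (hmem.mp h)]
  · rw [if_neg h, if_neg (fun h' => h (hmem.mpr h'))]

lemma solve_fast2_agree (A : List Int) (hne : A ≠ []) (hpos : ∀ a ∈ A, 1 ≤ a) :
    solve_fast2 A = solve_fast2_alt A := by
  cases hmx : PySem.List.max? A (fun x => x) with
  | none => exact absurd ((PySem.List.max?_eq_none_iff A _).mp hmx) hne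
  | some mx =>
    have hub : ∀ y ∈ A, y ≤ mx := PySem.List.max?_isMax hmx
    have hmx1 : 1 ≤ mx := hpos mx (PySem.List.max?_mem hmx)
    have hszs : (((Array.replicate (mx + 1).toNat (0:Int)).size : Nat) : Int) = mx + 1 := by
      rw [Array.size_replicate]; omega
    have hbf : ∀ y, 0 ≤ y →
        pyAGet (A.foldl (fun f a => pyASet f a 1) (Array.replicate (mx + 1).toNat 0)) y
          = if y ∈ A then 1 else 0 := by
      intro y hy
      rw [bf_fold_eq A _ y hy (fun a haA => by
        have h1 := hpos a haA
        have h2 := hub a haA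
        exact ⟨by omega, by rw [hszs]; omega⟩)]
      by_cases hyA : y ∈ A <;> simp [hyA, pyAGet_replicate]
    have hguard : (A.isEmpty || A.any (fun a => decide (a < 1))) = false := by
      simp only [Bool.or_eq_false_iff, List.isEmpty_eq_false_iff, List.any_eq_false,
        decide_eq_true_eq]
      exact ⟨hne, fun a ha => by have := hpos a ha; omega⟩
    unfold solve_fast2 solve_fast2_alt
    rw [hmx, hguard]
    simp only [Bool.false_eq_true, if_false]
    apply List.map_congr_left
    intro a haA
    have ha1 : 1 ≤ a := hpos a haA
    rw [outer_fold_eq A mx _ hbf A hpos hub _ hszs a (by omega)]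
    rw [pyAGet_replicate]
    rw [dict_outer_fold_eq (PySem.Set.ofList A) (PySem.Set.nodup_ofList A) A _ a]
    rw [score0_getD A PySem.Dict.empty (fun y => PySem.Dict.getD_empty y 0) a]
    have : A.map (fun t => incA A mx t a) = A.map (fun t => incB (PySem.Set.ofList A) t a) := by
      apply List.map_congr_left
      intro t htA
      exact incA_eq_incB A mx hub t (hpos t htA) a haA
    rw [this]

-- ===== VERDICT (by name: the statement is the Claim_ definition above) =====
theorem solve_fast2_spec : Claim_equal_solve_fast2 := by
  intro A _ hpre
  exact solve_fast2_agree A hpre.1 hpre.2
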